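-- pv_equiv track=rewrite | github.com/AnastasiaSurova/2019-2-level-labs | lab_1/main.py | filter_stop_words
-- ===== SOURCE A (Python) =====
-- def filter_stop_words(frequencies, stop_words):
--     """
--     Removes all stop words from the given frequencies dictionary
--     """
--     if frequencies is not None:
--         clear_freq = frequencies.copy()
--         if stop_words is not None:
--             stop_words_list = list(stop_words)
--             for key in clear_freq.keys():
--                 if type(key) != str:
--                     stop_words_list.append(key)
--             for stop in stop_words_list:
--                 if stop in clear_freq.keys():
--                     del clear_freq[stop]
--         return clear_freq
--     else:
--         frequencies = {}
--         return frequencies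
-- ===== SOURCE B (Python) =====
-- def filter_stop_words(frequencies, stop_words):
--     """
--     Removes all stop words from the given frequencies dictionary
--     """
--     if frequencies is None:
--         return {}
--     if stop_words is None:
--         return frequencies.copy()
--     stops = set(stop_words)
--     out = {}
--     for k, v in frequencies.items():
--         if type(k) == str and k not in stops:
--             out[k] = v
--     return out
-- ===== Notes on version B (the rewrite author's own statement) =====
-- stated objective: simpler
-- what changed: A copies the dict, augments the stop list with every non-string key, then loops over that union deleting keys that are present; B never mutates the input: it builds one set of stop words and constructs a fresh output dict in a single pass over frequencies.items(), keeping only the surviving entries.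
import Mathlib
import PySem

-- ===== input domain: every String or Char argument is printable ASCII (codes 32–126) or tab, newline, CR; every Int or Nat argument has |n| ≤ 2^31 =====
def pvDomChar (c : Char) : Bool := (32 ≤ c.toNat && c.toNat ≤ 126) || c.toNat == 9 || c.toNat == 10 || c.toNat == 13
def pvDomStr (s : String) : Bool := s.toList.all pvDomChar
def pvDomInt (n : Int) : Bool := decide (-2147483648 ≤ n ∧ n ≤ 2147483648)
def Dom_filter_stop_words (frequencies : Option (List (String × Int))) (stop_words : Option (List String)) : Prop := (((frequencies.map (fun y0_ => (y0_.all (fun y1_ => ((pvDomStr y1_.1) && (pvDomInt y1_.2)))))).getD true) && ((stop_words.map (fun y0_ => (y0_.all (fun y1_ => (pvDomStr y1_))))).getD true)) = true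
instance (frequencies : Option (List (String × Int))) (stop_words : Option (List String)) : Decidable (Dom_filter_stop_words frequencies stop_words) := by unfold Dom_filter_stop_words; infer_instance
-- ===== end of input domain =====

-- B replaces A's copy-then-delete mutation loop over the union of stop words and
-- non-string keys with a single constructive pass that builds a fresh output dict
-- (simpler decomposition, same cost).
-- ===== PORT A =====
def filter_stop_words (frequencies : Option (List (String × Int))) (stop_words : Option (List String)) : List (String × Int) :=
  match frequencies with
  | none => []
  | some clear_freq =>
    match stop_words with
    | none => clear_freq
    | some sws =>
      -- stop_words_list := list(stop_words) ++ non-string keys; under the type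
      -- convention every key is a String, so the 'type(key) != str' loop adds nothing.
      -- 'if stop in clear_freq.keys(): del clear_freq[stop]' — del removes the
      -- entry with that key (keys of a Python dict are unique).
      sws.foldl (fun clear stop =>
        if clear.any (fun kv => kv.1 == stop) then
          clear.filter (fun kv => !(kv.1 == stop))
        else clear) clear_freq

-- ===== PORT B =====
-- out = {}; for k, v in frequencies.items(): if type(k) == str and k not in stops: out[k] = v
-- (keys in frequencies are unique, so out[k] = v is always a fresh append;
-- all keys are Strings under the type convention)
def fswBuild (stops : PySem.Set String) : List (String × Int) → List (String × Int)
  | [] => []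
  | kv :: rest =>
    if stops.contains kv.1 then fswBuild stops rest
    else kv :: fswBuild stops rest

def filter_stop_words_alt (frequencies : Option (List (String × Int))) (stop_words : Option (List String)) : List (String × Int) :=
  match frequencies, stop_words with
  | none, _ => []
  | some fs, none => fs
  | some fs, some sws => fswBuild (PySem.Set.ofList sws) fs

-- ===== PRECONDITION & SPEC =====
def Spec_filter_stop_words (frequencies : Option (List (String × Int))) (stop_words : Option (List String)) (out : List (String × Int)) : Prop := out = filter_stop_words_alt frequencies stop_words
instance (frequencies : Option (List (String × Int))) (stop_words : Option (List String)) (out : List (String × Int)) : Decidable (Spec_filter_stop_words frequencies stop_words out) := by unfold Spec_filter_stop_words; infer_instance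

-- ===== CLAIM (what is proved, stated in full; the proofs are below) =====
def Claim_equal_filter_stop_words : Prop := ∀ (frequencies : Option (List (String × Int))) (stop_words : Option (List String)), Dom_filter_stop_words frequencies stop_words → Spec_filter_stop_words frequencies stop_words (filter_stop_words frequencies stop_words)

-- ===== LEMMAS AND PROOFS =====

theorem foldl_del_eq_filter (sws : List String) (fs : List (String × Int)) :
    sws.foldl (fun clear stop =>
        if clear.any (fun kv => kv.1 == stop) then
          clear.filter (fun kv => !(kv.1 == stop))
        else clear) fs
      = fs.filter (fun kv => !(sws.contains kv.1)) := by
  induction sws generalizing fs with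
  | nil => simp
  | cons s t ih =>
    simp only [List.foldl_cons]
    by_cases h : fs.any (fun kv => kv.1 == s)
    · rw [if_pos h, ih, List.filter_filter]
      apply List.filter_congr
      intro kv _
      have hc : (kv.1 == s) = decide (s = kv.1) := by
        by_cases he : s = kv.1 <;> simp [he]
        exact fun h2 => he h2.symm
      simp [hc, List.contains_cons, Bool.and_comm]
      congr 1
      by_cases he : s = kv.1 <;> simp [he]
      exact fun h2 => he h2.symm
    · rw [if_neg h, ih]
      apply List.filter_congr
      intro kv hkv
      have hne : ¬ (kv.1 = s) := fun he =>
        h (List.any_eq_true.mpr ⟨kv, hkv, by simp [he]⟩)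
      simp [hne]

theorem fswBuild_eq_filter (stops : PySem.Set String) (fs : List (String × Int)) :
    fswBuild stops fs = fs.filter (fun kv => !(stops.contains kv.1)) := by
  induction fs with
  | nil => rfl
  | cons kv rest ih =>
    by_cases h : stops.contains kv.1 = true
    · simp [fswBuild, h, ih, List.filter_cons]
    · simp [fswBuild, h, ih, List.filter_cons]

theorem filter_contains_ofList (sws : List String) (fs : List (String × Int)) :
    fs.filter (fun kv => !((PySem.Set.ofList sws).contains kv.1))
      = fs.filter (fun kv => !(sws.contains kv.1)) := by
  apply List.filter_congr
  intro kv _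
  simp [PySem.Set.mem_ofList]

-- ===== VERDICT (by name: the statement is the Claim_ definition above) =====
theorem filter_stop_words_spec : Claim_equal_filter_stop_words := by
  intro frequencies stop_words _
  unfold Spec_filter_stop_words filter_stop_words filter_stop_words_alt
  cases frequencies with
  | none => rfl
  | some fs =>
    cases stop_words with
    | none => rfl
    | some sws =>
      dsimp only
      rw [foldl_del_eq_filter, fswBuild_eq_filter, filter_contains_ofList]
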